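-- pv_equiv track=rewrite | github.com/touzet/pampa | src/collagen.py | Pmask_distance
-- ===== SOURCE A (Python) =====
-- def Pmask_distance(seq1, seq2):
--     if len(seq1)!=len(seq2):
--         return -1
--     r=0
--     for c1, c2 in zip(seq1, seq2):
--         if c1=='P' and c2=='P':
--             None
--         elif c1=='P'or c2=='P':
--             r=r+1
--     return r
-- ===== SOURCE B (Python) =====
-- def Pmask_distance(seq1, seq2):
--     if len(seq1) != len(seq2):
--         return -1
--     a = seq1.count('P')
--     b = seq2.count('P')
--     both = sum(1 for c1, c2 in zip(seq1, seq2) if c1 == 'P' and c2 == 'P')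
--     return a + b - 2 * both
-- ===== Notes on version B (the rewrite author's own statement) =====
-- stated objective: alternative
-- what changed: Replaces the per-position branching XOR loop by inclusion-exclusion: total P-count of each string minus twice the number of positions where both are P.
import Mathlib
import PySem

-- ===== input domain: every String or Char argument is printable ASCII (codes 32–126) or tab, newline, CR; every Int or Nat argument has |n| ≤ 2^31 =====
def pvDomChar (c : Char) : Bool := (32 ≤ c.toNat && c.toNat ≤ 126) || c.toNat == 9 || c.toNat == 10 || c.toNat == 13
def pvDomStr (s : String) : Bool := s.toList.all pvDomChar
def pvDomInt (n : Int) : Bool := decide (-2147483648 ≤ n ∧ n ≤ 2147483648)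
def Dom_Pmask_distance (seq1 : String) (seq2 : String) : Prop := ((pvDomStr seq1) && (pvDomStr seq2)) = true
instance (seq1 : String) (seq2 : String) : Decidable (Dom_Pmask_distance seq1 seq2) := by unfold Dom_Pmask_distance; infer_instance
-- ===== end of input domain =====

-- B replaces A's per-position branching XOR loop by inclusion-exclusion over P-counts (alternative decomposition, same cost).


-- ===== PORT A =====
-- A: length guard, then a single pass over zip accumulating r with the if/elif branches in order.
def Pmask_distance (seq1 : String) (seq2 : String) : Int :=
  if seq1.toList.length ≠ seq2.toList.length then -1
  else
    (seq1.toList.zip seq2.toList).foldl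
      (fun r p =>
        if p.1 = 'P' ∧ p.2 = 'P' then r
        else if p.1 = 'P' ∨ p.2 = 'P' then r + 1
        else r) 0

-- ===== PORT B =====
-- B: inclusion-exclusion — count 'P' in each string, subtract twice the shared-P positions.
def Pmask_distance_alt (seq1 : String) (seq2 : String) : Int :=
  if seq1.toList.length ≠ seq2.toList.length then -1
  else
    let a : Int := seq1.toList.count 'P'
    let b : Int := seq2.toList.count 'P'
    let both : Int := (seq1.toList.zip seq2.toList).countP (fun p => p.1 = 'P' ∧ p.2 = 'P')
    a + b - 2 * both

-- ===== PRECONDITION & SPEC =====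
def Spec_Pmask_distance (seq1 : String) (seq2 : String) (out : Int) : Prop := out = Pmask_distance_alt seq1 seq2
instance (seq1 : String) (seq2 : String) (out : Int) : Decidable (Spec_Pmask_distance seq1 seq2 out) := by unfold Spec_Pmask_distance; infer_instance

-- ===== CLAIM (what is proved, stated in full; the proofs are below) =====
def Claim_equal_Pmask_distance : Prop := ∀ (seq1 : String) (seq2 : String), Dom_Pmask_distance seq1 seq2 → Spec_Pmask_distance seq1 seq2 (Pmask_distance seq1 seq2)

-- ===== LEMMAS AND PROOFS =====

-- A's loop on equal-length lists equals B's inclusion-exclusion formula, with accumulator r.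
theorem pmask_loop_eq (l1 l2 : List Char) (h : l1.length = l2.length) (r : Int) :
    (l1.zip l2).foldl
      (fun r p =>
        if p.1 = 'P' ∧ p.2 = 'P' then r
        else if p.1 = 'P' ∨ p.2 = 'P' then r + 1
        else r) r
    = r + (l1.count 'P' : Int) + (l2.count 'P' : Int)
        - 2 * ((l1.zip l2).countP (fun p => p.1 = 'P' ∧ p.2 = 'P') : Int) := by
  induction l1 generalizing l2 r with
  | nil =>
    cases l2 with
    | nil => simp
    | cons c t => simp at h
  | cons c1 t1 ih =>
    cases l2 with
    | nil => simp at h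
    | cons c2 t2 =>
      simp only [List.length_cons, Nat.succ.injEq] at h
      simp only [List.zip_cons_cons, List.foldl_cons, List.count_cons, List.countP_cons]
      rw [ih t2 h]
      by_cases h1 : c1 = 'P' <;> by_cases h2 : c2 = 'P' <;>
        simp [h1, h2] <;> ring

-- ===== VERDICT (by name: the statement is the Claim_ definition above) =====
theorem Pmask_distance_spec : Claim_equal_Pmask_distance := by
  intro seq1 seq2 _
  unfold Spec_Pmask_distance Pmask_distance Pmask_distance_alt
  by_cases h : seq1.toList.length = seq2.toList.length
  · simp only [h, ne_eq, not_true_eq_false, if_false]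
    rw [pmask_loop_eq _ _ h 0]
    ring
  · simp only [ne_eq, h, not_false_eq_true, if_true]
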